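-- pv_equiv track=rewrite | github.com/ilithiofobik/aoc2022 | src/day25.py | snafu_encode
-- ===== SOURCE A (Python) =====
-- def snafu_encode(number: int) -> str:
--     digit_to_snafu = {
--         2: "2",
--         1: "1",
--         0: "0",
--         4: "-",
--         3: "=",
--     }
--
--     if number == 0:
--         return "0"
--
--     snafu = ""
--
--     while number > 0:
--         remainder = number % 5
--         snafu = digit_to_snafu[remainder] + snafu
--         if remainder in (3, 4):
--             number += 5 - remainder
--         number //= 5
--
--     return snafu
-- ===== SOURCE B (Python) =====
-- def snafu_encode(number: int) -> str:
--     bal = {-2: "=", -1: "-", 0: "0", 1: "1", 2: "2"}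
--
--     if number == 0:
--         return "0"
--
--     # pass 1: plain base-5 digits, least-significant first
--     digits = []
--     n = number
--     while n > 0:
--         digits.append(n % 5)
--         n //= 5
--
--     # pass 2: propagate the balancing carry and map each digit to its char
--     carry = 0
--     chars = []
--     for d in digits:
--         d += carry
--         if d >= 3:
--             d -= 5
--             carry = 1
--         else:
--             carry = 0
--         chars.append(bal[d])
--     if carry:
--         chars.append("1")
--
--     return "".join(reversed(chars))
-- ===== Notes on version B (the rewrite author's own statement) =====
-- stated objective: alternative
-- what changed: A fuses digit extraction and balancing into one loop that mutates the dividend (adding 5-remainder before dividing); B first extracts the plain base-5 digit list in one pass, then runs a separate carry-propagation pass mapping each balanced digit to its character and emitting a final leftover carry.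
import Mathlib
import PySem

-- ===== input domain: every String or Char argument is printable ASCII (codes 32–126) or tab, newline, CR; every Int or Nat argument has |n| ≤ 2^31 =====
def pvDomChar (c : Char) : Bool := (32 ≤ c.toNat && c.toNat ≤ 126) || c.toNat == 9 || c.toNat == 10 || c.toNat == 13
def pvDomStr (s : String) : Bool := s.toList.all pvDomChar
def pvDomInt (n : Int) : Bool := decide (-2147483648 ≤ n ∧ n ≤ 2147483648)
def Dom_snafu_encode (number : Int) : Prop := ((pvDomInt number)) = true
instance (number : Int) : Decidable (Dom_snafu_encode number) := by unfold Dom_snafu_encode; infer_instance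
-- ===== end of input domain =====

-- B splits A's fused extract-and-balance loop into a base-5 digit pass plus a separate carry-propagation pass (alternative decomposition, same cost).


-- ===== PORT A =====
-- str values are ported as their character lists (wrapped with String.ofList once at the top level); '+' on str is '++' — exact.
-- A's dict lookup digit_to_snafu[remainder]: remainder = n % 5 with n > 0 is always in {0,1,2,3,4}, so the key is always present;
-- ported as a total helper with the same key→value table.
def digitToSnafuA (r : Int) : List Char :=
  if r = 2 then ['2'] else if r = 1 then ['1'] else if r = 0 then ['0']
  else if r = 4 then ['-'] else ['=']

def snafuLoopA (n : Int) (snafu : List Char) : List Char :=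
  if _h : n > 0 then
    snafuLoopA
      (PySem.Int.floordiv
        (if PySem.Int.mod n 5 = 3 ∨ PySem.Int.mod n 5 = 4 then n + (5 - PySem.Int.mod n 5) else n) 5)
      (digitToSnafuA (PySem.Int.mod n 5) ++ snafu)
  else snafu
termination_by n.toNat
decreasing_by
  have h3 := PySem.Int.floordiv_mul_add_mod n 5
  rw [PySem.Int.floordiv_eq_ediv_of_pos (by omega)]
  split_ifs <;> omega

def snafu_encode (number : Int) : String :=
  if number = 0 then "0" else String.ofList (snafuLoopA number [])

-- ===== PORT B =====
-- B's dict lookup bal[d]: d is always in {-2,-1,0,1,2}; ported as a total helper with the same table.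
def balChar (d : Int) : Char :=
  if d = -2 then '=' else if d = -1 then '-' else if d = 0 then '0' else if d = 1 then '1' else '2'

-- pass 1: plain base-5 digits, least-significant first
def digits5 (n : Int) : List Int :=
  if _h : n > 0 then PySem.Int.mod n 5 :: digits5 (PySem.Int.floordiv n 5) else []
termination_by n.toNat
decreasing_by
  have h3 := PySem.Int.floordiv_mul_add_mod n 5
  have h1 := PySem.Int.mod_nonneg n (b := 5) (by omega)
  have h2 := PySem.Int.mod_lt n (b := 5) (by omega)
  omega

-- pass 2: propagate the balancing carry; 'if carry:' tests carry ≠ 0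
def carryPass : List Int → Int → List Char
  | [], carry => if carry ≠ 0 then ['1'] else []
  | d :: ds, carry =>
    if d + carry ≥ 3 then balChar (d + carry - 5) :: carryPass ds 1
    else balChar (d + carry) :: carryPass ds 0

-- "".join(reversed(chars)) on single-char strings = String.ofList of the reversed char list — exact.
def snafu_encode_alt (number : Int) : String :=
  if number = 0 then "0" else String.ofList ((carryPass (digits5 number) 0).reverse)

-- ===== PRECONDITION & SPEC =====
def Spec_snafu_encode (number : Int) (out : String) : Prop := out = snafu_encode_alt number
instance (number : Int) (out : String) : Decidable (Spec_snafu_encode number out) := by unfold Spec_snafu_encode; infer_instance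

-- ===== CLAIM (what is proved, stated in full; the proofs are below) =====
def Claim_equal_snafu_encode : Prop := ∀ (number : Int), Dom_snafu_encode number → Spec_snafu_encode number (snafu_encode number)

-- ===== LEMMAS AND PROOFS =====

-- A's loop on n + c (c the pending balancing carry, 0 or 1) produces exactly B's carry pass over the base-5 digits of n, reversed.
lemma loopA_eq_carryPass : ∀ (k : Nat) (n : Int), n.toNat = k → 0 ≤ n →
    ∀ (c : Int), (c = 0 ∨ c = 1) → ∀ (acc : List Char),
    snafuLoopA (n + c) acc = (carryPass (digits5 n) c).reverse ++ acc := by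
  intro k
  induction k using Nat.strong_induction_on with
  | _ k ih =>
    intro n hk hn c hc acc
    by_cases hpos : 0 < n
    · have h3 := PySem.Int.floordiv_mul_add_mod n 5
      have h1 := PySem.Int.mod_nonneg n (b := 5) (by omega)
      have h2 := PySem.Int.mod_lt n (b := 5) (by omega)
      have hdig : digits5 n = PySem.Int.mod n 5 :: digits5 (PySem.Int.floordiv n 5) := by
        rw [digits5]; simp [hpos]
      rw [hdig, snafuLoopA, dif_pos (by omega : n + c > 0)]
      rw [PySem.Int.mod_eq_emod_of_pos (a := n + c) (by norm_num)] at *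
      rw [PySem.Int.mod_eq_emod_of_pos (a := n) (by norm_num)] at *
      set r := n % 5 with hr
      set q := PySem.Int.floordiv n 5 with hq
      have hq0 : 0 ≤ q := by omega
      have hqk : q.toNat < k := by omega
      by_cases hbig : r + c ≥ 3
      · by_cases h5 : r + c = 5
        · have hm : (n + c) % 5 = 0 := by omega
          rw [hm]
          rw [if_neg (by omega : ¬ ((0:Int) = 3 ∨ (0:Int) = 4))]
          have hnext : PySem.Int.floordiv (n + c) 5 = q + 1 := by
            rw [PySem.Int.floordiv_eq_ediv_of_pos (by norm_num)]; omega
          rw [hnext, ih q.toNat hqk q rfl hq0 1 (Or.inr rfl) _]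
          rw [carryPass, if_pos hbig]
          have : r + c - 5 = 0 := by omega
          simp [this, digitToSnafuA, balChar]
        · have hm : (n + c) % 5 = r + c := by omega
          rw [hm, if_pos (by omega : (r + c = 3 ∨ r + c = 4))]
          have hnext : PySem.Int.floordiv (n + c + (5 - (r + c))) 5 = q + 1 := by
            rw [PySem.Int.floordiv_eq_ediv_of_pos (by norm_num)]; omega
          rw [hnext, ih q.toNat hqk q rfl hq0 1 (Or.inr rfl) _]
          rw [carryPass, if_pos hbig]
          have h34 : r + c = 3 ∨ r + c = 4 := by omega
          rcases h34 with h34 | h34 <;>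
            simp [h34, digitToSnafuA, balChar]
      · have hm : (n + c) % 5 = r + c := by omega
        rw [hm, if_neg (by omega : ¬ (r + c = 3 ∨ r + c = 4))]
        have hnext : PySem.Int.floordiv (n + c) 5 = q := by
          rw [PySem.Int.floordiv_eq_ediv_of_pos (by norm_num)]; omega
        have ihq := ih q.toNat hqk q rfl hq0 0 (Or.inl rfl) (digitToSnafuA (r + c) ++ acc)
        rw [add_zero] at ihq
        rw [hnext, ihq, carryPass, if_neg hbig]
        have h012 : r + c = 0 ∨ r + c = 1 ∨ r + c = 2 := by omega
        rcases h012 with h | h | h <;> simp [h, digitToSnafuA, balChar]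
    · have hz : n = 0 := by omega
      subst hz
      rcases hc with hc | hc <;> subst hc
      · rw [snafuLoopA]
        simp [digits5, carryPass]
      · have e1 : PySem.Int.mod 1 5 = 1 := by decide
        have e2 : PySem.Int.floordiv 1 5 = 0 := by decide
        rw [show (0:Int) + 1 = 1 from rfl, snafuLoopA, dif_pos (by norm_num : (1:Int) > 0), e1,
          if_neg (by norm_num : ¬ ((1:Int) = 3 ∨ (1:Int) = 4)), e2, snafuLoopA]
        simp [digits5, carryPass, digitToSnafuA]

theorem snafu_encode_spec : Claim_equal_snafu_encode := by
  intro number _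
  unfold Spec_snafu_encode snafu_encode snafu_encode_alt
  by_cases h0 : number = 0
  · simp [h0]
  · simp only [if_neg h0]
    rcases lt_or_gt_of_ne h0 with hlt | hgt
    · rw [snafuLoopA, digits5]
      simp [not_lt.mpr (le_of_lt hlt), carryPass]
    · have := loopA_eq_carryPass number.toNat number rfl (le_of_lt hgt) 0 (Or.inl rfl) []
      simp only [add_zero, List.append_nil] at this
      rw [this]
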